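-- pv_equiv track=rewrite | github.com/jt291/algorithmique | tex/td/corriges/td3/td3.22.py | codage
-- ===== SOURCE A (Python) =====
-- def codage(n,b,k,remplir=False) :
--     """
--     statut, code = codage(n,b,k,remplir)
--     code en base b sur k bits maximum l'entier décimal n
--     statut = 'normal' si 0 <= n < b**k, 'overflow' sinon
--     si remplir == True, on remplit à gauche de 0 pour avoir len(code) = k
--
--     >>> codage(0,2,8,False)
--     ('normal', [0])
--     >>> codage(0,2,8,True)
--     ('normal', [0, 0, 0, 0, 0, 0, 0, 0])
--     >>> codage(256,2,8,False)
--     ('overflow', [0])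
--     >>> codage(65,2,8,False)
--     ('normal', [1, 0, 0, 0, 0, 0, 1])
--     >>> codage(65,2,8,True)
--     ('normal', [0, 1, 0, 0, 0, 0, 0, 1])
--     >>> codage(65,5,4,True)
--     ('normal', [0, 2, 3, 0])
--     >>> codage(79,16,4,True)
--     ('normal', [0, 0, 4, 15])
--     """
--     assert type(n) is int and n >= 0
--     assert type(b) is int and b > 1
--     assert type(k) is int and k > 0
--
--     if n == 0 :
--         statut = 'normal'
--         code = [0]
--     elif n >= b**k :
--         statut = 'overflow'
--         code = [0]
--     else :
--         statut = 'normal'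
--         code = []
--         i = 0
--         while (n != 0) and (i < k) :
--                 code.insert(0,n%b)
--                 n = n//b
--                 i = i + 1
--
--     if remplir == True :
--         diffLen = k - len(code)
--         for i in range(diffLen):
--             code.insert(0,0)
--
--     return statut, code
-- ===== SOURCE B (Python) =====
-- def codage(n, b, k, remplir=False):
--     assert type(n) is int and n >= 0
--     assert type(b) is int and b > 1
--     assert type(k) is int and k > 0
--
--     if n == 0:
--         statut, code = 'normal', [0]
--     elif n >= b**k:
--         statut, code = 'overflow', [0]
--     else:
--         statut = 'normal'
--         t, d = n, 0
--         while t > 0: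
--             t //= b
--             d += 1
--         code = [(n // b**p) % b for p in range(d-1, -1, -1)]
--
--     if remplir:
--         code = [0] * (k - len(code)) + code
--
--     return statut, code
-- ===== Notes on version B (the rewrite author's own statement) =====
-- stated objective: alternative
-- what changed: B replaces A's single repeated-division loop with front insertion by a count-digits pre-pass followed by positional power extraction ((n // b**p) % b, most-significant first) built by a comprehension, and replaces the insert-in-a-loop padding by list concatenation.
import Mathlib
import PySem

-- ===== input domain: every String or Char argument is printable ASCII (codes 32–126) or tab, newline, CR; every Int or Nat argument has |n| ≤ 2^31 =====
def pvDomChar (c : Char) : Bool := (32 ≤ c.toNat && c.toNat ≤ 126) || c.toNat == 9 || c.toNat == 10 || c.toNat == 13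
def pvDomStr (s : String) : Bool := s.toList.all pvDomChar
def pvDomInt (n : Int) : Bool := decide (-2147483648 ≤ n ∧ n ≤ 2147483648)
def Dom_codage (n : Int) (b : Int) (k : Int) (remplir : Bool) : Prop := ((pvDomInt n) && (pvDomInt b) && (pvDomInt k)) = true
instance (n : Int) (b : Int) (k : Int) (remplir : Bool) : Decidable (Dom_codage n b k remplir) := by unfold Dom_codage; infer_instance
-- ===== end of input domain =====

-- B replaces A's repeated-division/front-insert loop by a digit-count pre-pass plus positional
-- power extraction, and the insert-loop padding by list concatenation (objective: alternative).


-- termination helper (cited by the recursive definitions below)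
theorem pvFdivShrink (t b : Int) (ht : 0 < t) (hb : 1 < b) :
    (PySem.Int.floordiv t b).toNat < t.toNat := by
  have h1 : PySem.Int.floordiv t b = t / b := PySem.Int.floordiv_eq_ediv_of_pos (by omega)
  have h2 : t / b < t := by
    apply Int.ediv_lt_of_lt_mul (by omega); nlinarith
  have h3 : 0 ≤ t / b := Int.ediv_nonneg (by omega) (by omega)
  omega

-- ===== PORT A =====
-- while (n != 0) and (i < k): code.insert(0, n%b); n = n//b; i = i+1
def codageLoopA (b k : Int) (n : Int) (i : Int) (code : List Int) : List Int :=
  if n ≠ 0 ∧ i < k then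
    codageLoopA b k (PySem.Int.floordiv n b) (i + 1) (PySem.Int.mod n b :: code)
  else code
termination_by (k - i).toNat
decreasing_by omega

def codage (n : Int) (b : Int) (k : Int) (remplir : Bool) : String × List Int :=
  -- asserts (n ≥ 0, b > 1, k > 0) are Pre_codage; b**k ported as b ^ k.toNat (exact for k ≥ 0)
  let sc : String × List Int :=
    if n = 0 then ("normal", [0])
    else if n ≥ b ^ k.toNat then ("overflow", [0])
    else ("normal", codageLoopA b k n 0 [])
  let code :=
    if remplir = true then
      -- for i in range(diffLen): code.insert(0,0)
      (PySem.List.pyRange 0 (k - (sc.2.length : Int)) 1).foldl (fun c _ => (0 : Int) :: c) sc.2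
    else sc.2
  (sc.1, code)

-- ===== PORT B =====
-- while t > 0: t //= b; d += 1   (the 1 < b guard only makes the recursion total; Pre_ has b > 1)
def codageCountB (b : Int) (t : Int) (d : Int) : Int :=
  if h : 0 < t ∧ 1 < b then codageCountB b (PySem.Int.floordiv t b) (d + 1) else d
termination_by t.toNat
decreasing_by exact pvFdivShrink t b h.1 h.2

def codage_alt (n : Int) (b : Int) (k : Int) (remplir : Bool) : String × List Int :=
  let sc : String × List Int :=
    if n = 0 then ("normal", [0])
    else if n ≥ b ^ k.toNat then ("overflow", [0])
    else
      let d := codageCountB b n 0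
      ("normal",
        (PySem.List.pyRange (d - 1) (-1) (-1)).map
          (fun p => PySem.Int.mod (PySem.Int.floordiv n (b ^ p.toNat)) b))
  let code :=
    if remplir then List.replicate (k - (sc.2.length : Int)).toNat 0 ++ sc.2 else sc.2
  (sc.1, code)

-- ===== PRECONDITION & SPEC =====
-- Pre_: exactly the asserts of A (AssertionError otherwise)
def Pre_codage (n : Int) (b : Int) (k : Int) (remplir : Bool) : Prop := 0 ≤ n ∧ 1 < b ∧ 0 < k
instance (n : Int) (b : Int) (k : Int) (remplir : Bool) : Decidable (Pre_codage n b k remplir) := by unfold Pre_codage; infer_instance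
def pvWitness_codage : Int × Int × Int × Bool := (65, 2, 8, true)

def Spec_codage (n : Int) (b : Int) (k : Int) (remplir : Bool) (out : String × List Int) : Prop := out = codage_alt n b k remplir
instance (n : Int) (b : Int) (k : Int) (remplir : Bool) (out : String × List Int) : Decidable (Spec_codage n b k remplir out) := by unfold Spec_codage; infer_instance

-- ===== CLAIM (what is proved, stated in full; the proofs are below) =====
def Claim_equal_codage : Prop := ∀ (n : Int) (b : Int) (k : Int) (remplir : Bool), Dom_codage n b k remplir → Pre_codage n b k remplir → Spec_codage n b k remplir (codage n b k remplir)

-- ===== LEMMAS AND PROOFS =====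

-- reference: most-significant-first base-b digits of n (empty for n = 0)
def msf (b : Int) (n : Int) : List Int :=
  if h : 0 < n ∧ 1 < b then msf b (PySem.Int.floordiv n b) ++ [PySem.Int.mod n b] else []
termination_by n.toNat
decreasing_by exact pvFdivShrink n b h.1 h.2

theorem loopA_eq_msf (b k : Int) (hb : 1 < b) :
    ∀ (m : Nat) (n i : Int) (code : List Int), n.toNat ≤ m → 0 ≤ n → n < b ^ (k - i).toNat →
      codageLoopA b k n i code = msf b n ++ code := by
  intro m
  induction m with
  | zero =>
    intro n i code hm hn _
    have hn0 : n = 0 := by omega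
    subst hn0
    rw [codageLoopA, msf]
    simp
  | succ m ih =>
    intro n i code hm hn hlt
    by_cases h0 : n = 0
    · subst h0; rw [codageLoopA, msf]; simp
    · have hpos : 0 < n := by omega
      have hik : i < k := by
        by_contra hc
        have : (k - i).toNat = 0 := by omega
        rw [this] at hlt
        simp at hlt
        omega
      have hfd : PySem.Int.floordiv n b = n / b := PySem.Int.floordiv_eq_ediv_of_pos (by omega)
      have hq0 : 0 ≤ n / b := Int.ediv_nonneg (by omega) (by omega)
      have hkk : (k - i).toNat = (k - (i + 1)).toNat + 1 := by omega
      have hlt' : n / b < b ^ (k - (i + 1)).toNat := by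
        rw [hkk, pow_succ] at hlt
        exact Int.ediv_lt_of_lt_mul (by omega) hlt
      have hsh := pvFdivShrink n b hpos hb
      rw [codageLoopA, if_pos ⟨h0, hik⟩, msf, dif_pos ⟨hpos, hb⟩, hfd]
      rw [ih (n / b) (i + 1) (PySem.Int.mod n b :: code) (by rw [hfd] at hsh; omega) hq0 hlt']
      simp

theorem countB_eq_len (b : Int) (hb : 1 < b) :
    ∀ (m : Nat) (n d : Int), n.toNat ≤ m → 0 ≤ n →
      codageCountB b n d = d + ((msf b n).length : Int) := by
  intro m
  induction m with
  | zero =>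
    intro n d hm hn
    have hn0 : n = 0 := by omega
    subst hn0
    rw [codageCountB, msf]
    simp
  | succ m ih =>
    intro n d hm hn
    by_cases h0 : n = 0
    · subst h0; rw [codageCountB, msf]; simp
    · have hpos : 0 < n := by omega
      have hsh := pvFdivShrink n b hpos hb
      have hq0 : 0 ≤ PySem.Int.floordiv n b := by
        rw [PySem.Int.floordiv_eq_ediv_of_pos (by omega : (0:Int) < b)]
        exact Int.ediv_nonneg (by omega) (by omega)
      rw [codageCountB, dif_pos ⟨hpos, hb⟩, msf, dif_pos ⟨hpos, hb⟩]
      rw [ih _ (d + 1) (by omega) hq0]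
      simp
      omega

theorem extract_eq_msf (b : Int) (hb : 1 < b) :
    ∀ (m : Nat) (n : Int), n.toNat ≤ m → 0 ≤ n →
      (PySem.List.pyRange (((msf b n).length : Int) - 1) (-1) (-1)).map
        (fun p => PySem.Int.mod (PySem.Int.floordiv n (b ^ p.toNat)) b) = msf b n := by
  intro m
  induction m with
  | zero =>
    intro n hm hn
    have hn0 : n = 0 := by omega
    subst hn0
    rw [msf]
    simp [PySem.List.pyRange_neg_one_eq_nil]
  | succ m ih =>
    intro n hm hn
    by_cases h0 : n = 0
    · subst h0; rw [msf]; simp [PySem.List.pyRange_neg_one_eq_nil]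
    · have hpos : 0 < n := by omega
      have hbpos : (0:Int) < b := by omega
      have hfd : PySem.Int.floordiv n b = n / b := PySem.Int.floordiv_eq_ediv_of_pos hbpos
      have hq0 : 0 ≤ n / b := Int.ediv_nonneg (by omega) (by omega)
      have hsh := pvFdivShrink n b hpos hb
      rw [msf, dif_pos ⟨hpos, hb⟩, hfd]
      set L := msf b (n / b) with hL
      -- both ranges as mapped Nat ranges
      rw [PySem.List.pyRange_neg_one]
      have hlen : ((L ++ [PySem.Int.mod n b]).length : Int) - 1 - (-1) = (L.length : Int) + 1 := by
        simp
      rw [hlen]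
      have htn : ((L.length : Int) + 1).toNat = L.length + 1 := by omega
      rw [htn, List.range_succ, List.map_append, List.map_append, List.map_map, List.map_map]
      congr 1
      · -- high digits = digits of n / b
        have ihh := ih (n / b) (by omega) hq0
        rw [PySem.List.pyRange_neg_one] at ihh
        have hlen' : (L.length : Int) - 1 - (-1) = (L.length : Int) := by omega
        rw [hlen'] at ihh
        simp only [Int.toNat_natCast] at ihh
        rw [List.map_map, ← hL] at ihh
        refine Eq.trans (List.map_congr_left ?_) ihh
        intro a ha
        have haL : a < L.length := List.mem_range.mp ha
        simp only [Function.comp_apply]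
        have e1 : (((L ++ [PySem.Int.mod n b]).length : Int) - 1 - a).toNat
            = ((L.length : Int) - 1 - a).toNat + 1 := by
          have hl1 : (L ++ [PySem.Int.mod n b]).length = L.length + 1 := by simp
          rw [hl1]; push_cast; omega
        rw [e1, pow_succ]
        congr 1
        rw [PySem.Int.floordiv_eq_ediv_of_pos (by positivity),
            PySem.Int.floordiv_eq_ediv_of_pos (by positivity), mul_comm,
            ← Int.ediv_ediv_of_nonneg (by omega)]
      · -- lowest digit: p = 0
        have e0 : (((L ++ [PySem.Int.mod n b]).length : Int) - 1 - (L.length : Int)).toNat = 0 := by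
          have hl1 : (L ++ [PySem.Int.mod n b]).length = L.length + 1 := by simp
          rw [hl1]; push_cast; omega
        simp only [List.map_cons, List.map_nil, Function.comp_apply, e0, pow_zero]
        rw [PySem.Int.floordiv_eq_ediv_of_pos (by omega : (0:Int) < 1)]
        simp

theorem foldl_prepend (code : List Int) :
    ∀ (l : List Int), l.foldl (fun c _ => (0 : Int) :: c) code
      = List.replicate l.length 0 ++ code := by
  intro l
  induction l generalizing code with
  | nil => simp
  | cons a l ih =>
    rw [List.foldl_cons, ih, List.length_cons, List.replicate_succ',
        List.append_assoc]
    simp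

theorem pad_eq (code : List Int) (m : Int) :
    (PySem.List.pyRange 0 m 1).foldl (fun c _ => (0 : Int) :: c) code
      = List.replicate m.toNat 0 ++ code := by
  rw [foldl_prepend, PySem.List.length_pyRange_one]
  congr 2
  omega

-- ===== VERDICT (by name: the statement is the Claim_ definition above) =====
theorem codage_spec : Claim_equal_codage := by
  intro n b k remplir _ hpre
  obtain ⟨hn, hb, hk⟩ := hpre
  unfold Spec_codage codage codage_alt
  by_cases h0 : n = 0
  · subst h0
    cases remplir <;> simp [pad_eq]
  · by_cases hov : n ≥ b ^ k.toNat
    · simp only [if_neg h0, if_pos hov]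
      cases remplir <;> simp [pad_eq]
    · have hpos : 0 < n := by omega
      push_neg at hov
      have hlt : n < b ^ (k - 0).toNat := by simpa using hov
      have hloop := loopA_eq_msf b k hb n.toNat n 0 [] (le_refl _) hn hlt
      have hcount := countB_eq_len b hb n.toNat n 0 (le_refl _) hn
      have hext := extract_eq_msf b hb n.toNat n (le_refl _) hn
      simp only [if_neg h0, if_neg (by omega : ¬ n ≥ b ^ k.toNat)]
      rw [List.append_nil] at hloop
      rw [hcount] at *
      simp only [zero_add] at *
      rw [hloop, hext]
      cases remplir <;> simp [pad_eq]
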